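-- pv_equiv track=rewrite | github.com/jelarson/Python_Practice | manual_matrix.py | manual_incrementing_matric
-- ===== SOURCE A (Python) =====
-- def manual_incrementing_matric(n):
--     matrix = [[None for y in range(n)] for x in range(n)]
--
--     counter = 0
--
--     for idx, el in enumerate(matrix):
--         for nested_idx, _ in enumerate(el):
--             matrix[idx][nested_idx] = counter + nested_idx
--
--         counter += 1
--
--     return matrix
-- ===== SOURCE B (Python) =====
-- def manual_incrementing_matric(n):
--     result = []
--     row = list(range(n))
--     for _ in range(n):
--         result.append(row)
--         row = [x + 1 for x in row]
--     return result
-- ===== Notes on version B (the rewrite author's own statement) =====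
-- stated objective: simpler
-- what changed: Instead of preallocating an n-by-n matrix of None and overwriting every cell with counter+index in nested index loops, B builds the first row as list(range(n)) and derives each subsequent row by adding 1 element-wise to the previous row, appending rows as it goes.
import Mathlib
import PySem

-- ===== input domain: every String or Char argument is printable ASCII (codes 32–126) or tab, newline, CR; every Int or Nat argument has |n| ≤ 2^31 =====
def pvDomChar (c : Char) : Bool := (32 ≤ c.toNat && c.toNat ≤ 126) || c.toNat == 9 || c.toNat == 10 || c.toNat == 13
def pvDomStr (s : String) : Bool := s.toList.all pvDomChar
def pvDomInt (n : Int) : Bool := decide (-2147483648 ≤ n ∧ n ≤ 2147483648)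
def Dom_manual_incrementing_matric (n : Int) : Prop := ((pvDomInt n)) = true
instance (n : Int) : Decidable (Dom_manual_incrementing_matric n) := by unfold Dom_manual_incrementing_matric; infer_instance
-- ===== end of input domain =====

-- B builds the first row as list(range(n)) and derives each next row by adding 1 to the
-- previous one (one running row instead of computing every cell from its indices); same values, simpler.

-- ===== PORT A =====
-- 'None' placeholder rendered as 0; every cell is overwritten before the matrix is returned.
def manual_incrementing_matric (n : Int) : List (List Int) :=
  let matrix : List (List Int) :=
    (PySem.List.pyRange 0 n 1).map (fun _ => (PySem.List.pyRange 0 n 1).map (fun _ => (0 : Int)))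
  let st :=
    (PySem.List.enumerate matrix 0).foldl
      (fun (st : List (List Int) × Int) (p : Int × List Int) =>
        let row :=
          (PySem.List.enumerate p.2 0).foldl
            (fun (e : List Int) (q : Int × Int) => PySem.List.pySetD e q.1 (st.2 + q.1)) p.2
        (PySem.List.pySetD st.1 p.1 row, st.2 + 1))
      (matrix, 0)
  st.1

-- ===== PORT B =====
def manual_incrementing_matric_alt (n : Int) : List (List Int) :=
  let first := PySem.List.pyRange 0 n 1
  ((PySem.List.pyRange 0 n 1).foldl
      (fun (st : List (List Int) × List Int) _ => (st.1 ++ [st.2], st.2.map (· + 1)))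
      (([] : List (List Int)), first)).1

-- ===== PRECONDITION & SPEC =====
def Spec_manual_incrementing_matric (n : Int) (out : List (List Int)) : Prop := out = manual_incrementing_matric_alt n
instance (n : Int) (out : List (List Int)) : Decidable (Spec_manual_incrementing_matric n out) := by unfold Spec_manual_incrementing_matric; infer_instance

-- ===== CLAIM (what is proved, stated in full; the proofs are below) =====
def Claim_equal_manual_incrementing_matric : Prop := ∀ (n : Int), Dom_manual_incrementing_matric n → Spec_manual_incrementing_matric n (manual_incrementing_matric n)

-- ===== LEMMAS AND PROOFS =====

-- the common closed form: row i is [i, i+1, …, i+k-1]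
def pvTarget (k : Nat) : List (List Int) :=
  (List.range k).map (fun (i : Nat) => (List.range k).map (fun (j : Nat) => ((i : Int) + (j : Int))))

-- inner loop of A: filling a row of length L at offset s
theorem pvInnerFill (c : Int) :
    ∀ (row : List Int) (s : Nat) (e : List Int), e.length = s + row.length →
      (PySem.List.enumerate row (s : Int)).foldl
          (fun (e : List Int) (q : Int × Int) => PySem.List.pySetD e q.1 (c + q.1)) e
        = e.take s ++ (List.range row.length).map (fun (j : Nat) => c + (s : Int) + (j : Int)) := by
  intro row
  induction row with
  | nil =>
      intro s e he
      simp only [List.length_nil, Nat.add_zero] at he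
      simp [PySem.List.enumerate_nil, List.take_of_length_le (le_of_eq he)]
  | cons x t ih =>
      intro s e he
      rw [PySem.List.enumerate_cons]
      simp only [List.foldl_cons]
      rw [PySem.List.pySetD_natCast e s (c + (s : Int))]
      have hs1 : ((s : Int) + 1) = (((s + 1 : Nat)) : Int) := by push_cast; ring
      rw [hs1, ih (s + 1) (e.set s (c + (s : Int)))
        (by simp only [List.length_set, List.length_cons] at he ⊢; omega)]
      have hslt : s < e.length := by
        simp only [List.length_cons] at he; omega
      have htake : (e.set s (c + (s : Int))).take (s + 1) = e.take s ++ [c + (s : Int)] := by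
        rw [List.set_eq_take_append_cons_drop, if_pos hslt]
        rw [List.take_append]
        simp [List.length_take, Nat.min_eq_left (le_of_lt hslt), List.take_of_length_le]
      rw [htake]
      rw [List.length_cons, List.range_succ_eq_map, List.map_cons, List.map_map]
      simp only [Nat.cast_zero, add_zero, List.append_assoc, List.singleton_append]
      congr 2
      apply List.map_congr_left
      intro j _
      simp only [Function.comp]
      push_cast
      ring

-- outer loop of A: setting row s+i to [s+i, s+i+1, …] for each enumerated row
theorem pvOuterFill (w : Nat) :
    ∀ (rows : List (List Int)) (s : Nat) (m : List (List Int)),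
      m.length = s + rows.length → (∀ r ∈ rows, r.length = w) →
      (PySem.List.enumerate rows (s : Int)).foldl
          (fun (st : List (List Int) × Int) (p : Int × List Int) =>
            (PySem.List.pySetD st.1 p.1
               ((PySem.List.enumerate p.2 0).foldl
                 (fun (e : List Int) (q : Int × Int) => PySem.List.pySetD e q.1 (st.2 + q.1)) p.2),
             st.2 + 1))
          (m, (s : Int))
        = (m.take s ++ (List.range rows.length).map
              (fun (i : Nat) => (List.range w).map (fun (j : Nat) => (s : Int) + (i : Int) + (j : Int))),
           (s : Int) + rows.length) := by
  intro rows
  induction rows with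
  | nil =>
      intro s m hm _
      simp only [List.length_nil, Nat.add_zero] at hm
      simp [PySem.List.enumerate_nil, List.take_of_length_le (le_of_eq hm)]
  | cons r rows ih =>
      intro s m hm hw
      rw [PySem.List.enumerate_cons]
      simp only [List.foldl_cons]
      have hrow : (PySem.List.enumerate r 0).foldl
          (fun (e : List Int) (q : Int × Int) => PySem.List.pySetD e q.1 ((s : Int) + q.1)) r
          = (List.range w).map (fun (j : Nat) => (s : Int) + (j : Int)) := by
        have := pvInnerFill ((s : Int)) r 0 r (by simp)
        simpa [hw r (List.mem_cons_self)] using this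
      rw [hrow]
      rw [PySem.List.pySetD_natCast m s _]
      have hs1 : ((s : Int) + 1) = (((s + 1 : Nat)) : Int) := by push_cast; ring
      rw [hs1, ih (s + 1) _ (by simp only [List.length_set, List.length_cons] at hm ⊢; omega)
        (fun r hr => hw r (List.mem_cons_of_mem _ hr))]
      have hslt : s < m.length := by
        simp only [List.length_cons] at hm; omega
      have htake : (m.set s ((List.range w).map (fun (j : Nat) => (s : Int) + (j : Int)))).take (s + 1)
          = m.take s ++ [(List.range w).map (fun (j : Nat) => (s : Int) + (j : Int))] := by
        rw [List.set_eq_take_append_cons_drop, if_pos hslt]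
        rw [List.take_append]
        simp [List.length_take, Nat.min_eq_left (le_of_lt hslt), List.take_of_length_le]
      rw [htake]
      rw [List.length_cons, List.range_succ_eq_map, List.map_cons, List.map_map]
      simp only [Prod.mk.injEq]
      constructor
      · simp only [Nat.cast_zero, add_zero, List.append_assoc, List.singleton_append]
        congr 2
        apply List.map_congr_left
        intro i _
        simp only [Function.comp_apply]
        apply List.map_congr_left
        intro j _
        push_cast
        ring
      · push_cast
        ring

-- B's loop: each iteration appends the running row and bumps it by 1
theorem pvBFold :
    ∀ (l : List Int) (acc : List (List Int)) (row : List Int),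
      l.foldl (fun (st : List (List Int) × List Int) _ => (st.1 ++ [st.2], st.2.map (· + 1))) (acc, row)
        = (acc ++ (List.range l.length).map (fun (i : Nat) => row.map (fun x => x + (i : Int))),
           row.map (fun x => x + (l.length : Int))) := by
  intro l
  induction l with
  | nil =>
      intro acc row
      simp
  | cons a t ih =>
      intro acc row
      simp only [List.foldl_cons]
      rw [ih (acc ++ [row]) (row.map (· + 1))]
      rw [List.length_cons, List.range_succ_eq_map]
      simp only [List.map_cons, List.map_map, Function.comp_def, Nat.cast_zero, add_zero,
        Prod.mk.injEq, List.append_assoc, List.singleton_append, List.map_id']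
      constructor
      · congr 1
        congr 1
        apply List.map_congr_left
        intro i _
        apply List.map_congr_left
        intro x _
        push_cast
        ring
      · apply List.map_congr_left
        intro x _
        push_cast
        ring

-- ===== VERDICT (by name: the statement is the Claim_ definition above) =====
theorem manual_incrementing_matric_spec : Claim_equal_manual_incrementing_matric := by
  intro n _
  unfold Spec_manual_incrementing_matric manual_incrementing_matric manual_incrementing_matric_alt
  rw [PySem.List.pyRange_one]
  simp only [Int.sub_zero, List.map_map, Function.comp_def]
  have H := pvOuterFill n.toNat
      ((List.range n.toNat).map (fun _ => (List.range n.toNat).map (fun _ => (0 : Int)))) 0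
      ((List.range n.toNat).map (fun _ => (List.range n.toNat).map (fun _ => (0 : Int))))
      (by simp)
      (by
        intro r hr
        rw [List.mem_map] at hr
        obtain ⟨a, _, rfl⟩ := hr
        simp)
  simp only [Nat.cast_zero, zero_add, List.take_zero, List.nil_append, List.length_map,
    List.length_range] at H
  rw [H, pvBFold]
  simp only [List.map_map, Function.comp_def, zero_add, List.length_map, List.length_range,
    List.nil_append]
  apply List.map_congr_left
  intro i _
  apply List.map_congr_left
  intro j _
  ring
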